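-- pv_equiv track=rewrite | github.com/uwuflanny/pollution_sonification | misc/py/residue.py | get_residue_states
-- ===== SOURCE A (Python) =====
-- def get_residue_states(data):
--
--     states  = []
--     levels  = [
--         0,      # REST
--         50,     # FALLING
--         100,    # HARARDOUS
--         150     # DANGEROUS
--     ]
--
--     for residue in data:
--
--         level = levels[0]
--         for i in range(1, len(levels)):
--             if residue > levels[i]:
--                 level = levels[i]
--             else:
--                 break
--
--         states.append(level)
--
--     return states
-- ===== SOURCE B (Python) =====
-- from bisect import bisect_left
--
-- _THRESHOLDS = [50, 100, 150]
-- _LEVELS = [0, 50, 100, 150]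
--
-- def get_residue_states(data):
--     return [_LEVELS[bisect_left(_THRESHOLDS, residue)] for residue in data]
-- ===== Notes on version B (the rewrite author's own statement) =====
-- stated objective: idiomatic
-- what changed: Replaces A's inner scan-with-break over the threshold list by a single bisect_left binary-search lookup into the levels table, and the accumulator loop by a list comprehension.
import Mathlib
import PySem

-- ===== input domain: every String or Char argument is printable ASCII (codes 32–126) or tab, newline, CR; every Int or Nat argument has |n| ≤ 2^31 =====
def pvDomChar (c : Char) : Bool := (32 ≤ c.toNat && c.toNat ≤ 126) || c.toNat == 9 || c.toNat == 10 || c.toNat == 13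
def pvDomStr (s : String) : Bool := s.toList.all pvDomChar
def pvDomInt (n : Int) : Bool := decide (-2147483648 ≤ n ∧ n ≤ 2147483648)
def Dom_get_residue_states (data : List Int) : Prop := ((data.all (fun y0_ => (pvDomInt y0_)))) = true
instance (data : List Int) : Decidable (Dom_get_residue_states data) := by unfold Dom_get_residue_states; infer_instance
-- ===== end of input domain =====

-- ===== PORT A =====
-- inner loop of A: for i in range(1,len(levels)): if residue > levels[i]: level = levels[i] else: break
-- ported as a fold over the tail thresholds with an explicit "broken" flag
def pvInnerA (residue : Int) (levels : List Int) : Int :=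
  (levels.foldl
    (fun (s : Int × Bool) li =>
      if s.2 then s else if residue > li then (li, false) else (s.1, true))
    (0, false)).1

def get_residue_states (data : List Int) : List Int :=
  data.foldl (fun states residue => states ++ [pvInnerA residue [50, 100, 150]]) []

-- ===== PORT B =====
-- port of B: bisect.bisect_left as a lo/hi binary search, then index into the levels list
def pvBisectLeft (xs : List Int) (x : Int) (lo hi : Nat) : Nat :=
  if h : lo < hi then
    let mid := (lo + hi) / 2
    if xs.getD mid 0 < x then pvBisectLeft xs x (mid + 1) hi
    else pvBisectLeft xs x lo mid
  else lo
termination_by hi - lo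
decreasing_by all_goals omega

def get_residue_states_alt (data : List Int) : List Int :=
  data.map (fun residue => [0, 50, 100, 150].getD (pvBisectLeft [50, 100, 150] residue 0 3) 0)

-- ===== PRECONDITION & SPEC =====
def Spec_get_residue_states (data : List Int) (out : List Int) : Prop := out = get_residue_states_alt data
instance (data : List Int) (out : List Int) : Decidable (Spec_get_residue_states data out) := by unfold Spec_get_residue_states; infer_instance

-- ===== CLAIM (what is proved, stated in full; the proofs are below) =====
def Claim_equal_get_residue_states : Prop := ∀ (data : List Int), Dom_get_residue_states data → Spec_get_residue_states data (get_residue_states data)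

-- ===== LEMMAS AND PROOFS =====

-- ===== VERDICT (by name: the statement is the Claim_ definition above) =====
lemma pvPoint (r : Int) :
    pvInnerA r [50, 100, 150] = [0, 50, 100, 150].getD (pvBisectLeft [50, 100, 150] r 0 3) 0 := by
  by_cases h1 : (50 : Int) < r <;> by_cases h2 : (100 : Int) < r <;> by_cases h3 : (150 : Int) < r <;>
    simp [pvInnerA, pvBisectLeft, h1, h2, h3] <;> omega

lemma pvFoldMap (data : List Int) (acc : List Int) :
    data.foldl (fun states residue => states ++ [pvInnerA residue [50, 100, 150]]) acc
      = acc ++ data.map (fun residue => [0, 50, 100, 150].getD (pvBisectLeft [50, 100, 150] residue 0 3) 0) := by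
  induction data generalizing acc with
  | nil => simp
  | cons x xs ih => rw [List.foldl_cons, ih, pvPoint]; simp

theorem get_residue_states_spec : Claim_equal_get_residue_states := by
  intro data _
  unfold Spec_get_residue_states get_residue_states get_residue_states_alt
  simpa using pvFoldMap data []
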